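-- pv_equiv track=rewrite | github.com/AmaliaGlezO/scr_shell_2025 | Shell_Linux.py | analizar_linea_comando
-- ===== SOURCE A (Python) =====
-- def analizar_linea_comando(linea):
--     # Maneja comillas y operadores correctamente
--     elementos = []
--     current = ""
--     in_quotes = None
--
--     for char in linea:
--         if char in ['"', "'"]:
--             if in_quotes is None:
--                 in_quotes = char
--             elif in_quotes == char:
--                 in_quotes = None
--             else:
--                 current += char
--         elif char in [' ', '\t'] and in_quotes is None:
--             if current:
--                 elementos.append(current)
--                 current = ""
--         else:
--             current += char
--
--     if current:
--         elementos.append(current)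
--
--     # Procesa operadores especiales
--     final_elements = []
--     i = 0
--     while i < len(elementos):
--         if elementos[i] in ['>>', '<<', '<', '>', '|', '&']:
--             final_elements.append(elementos[i])
--         else:
--             # Limpia las comillas solo si están al inicio y final
--             elem = elementos[i]
--             if (elem.startswith('"') and elem.endswith('"')) or (elem.startswith("'") and elem.endswith("'")):
--                 elem = elem[1:-1]
--             final_elements.append(elem)
--         i += 1
--
--     return final_elements
-- ===== SOURCE B (Python) =====
-- def _unquote(tok):
--     if tok[0] in '"\'' and tok[-1] == tok[0]:
--         return tok[1:-1]
--     return tok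
--
-- def analizar_linea_comando(linea):
--     OPS = ('>>', '<<', '<', '>', '|', '&')
--     res = []
--     n = len(linea)
--     i = 0
--     while i < n:
--         if linea[i] in ' \t':
--             i += 1
--             continue
--         # scan one token: jump over quoted segments with find(), over runs of
--         # ordinary characters with a run scan; collect slices, join at the end
--         parts = []
--         while i < n:
--             c = linea[i]
--             if c in ' \t':
--                 i += 1
--                 break
--             if c in '"\'':
--                 j = linea.find(c, i + 1)
--                 if j == -1:
--                     parts.append(linea[i + 1:])
--                     i = n
--                 else:
--                     parts.append(linea[i + 1:j])
--                     i = j + 1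
--             else:
--                 j = i + 1
--                 while j < n and linea[j] not in ' \t"\'':
--                     j += 1
--                 parts.append(linea[i:j])
--                 i = j
--         tok = ''.join(parts)
--         if tok:
--             res.append(tok if tok in OPS else _unquote(tok))
--     return res
-- ===== Notes on version B (the rewrite author's own statement) =====
-- stated objective: alternative
-- what changed: B replaces A's per-character quote state machine plus second cleanup pass by a positional scanner: it skips whitespace, then builds each token from whole slices - jumping over quoted segments with str.find and over runs of ordinary characters with a run scan - finalizing (operator check / quote strip) each token as it is emitted, with no intermediate token list and no quote-state variable.
import Mathlib
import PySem

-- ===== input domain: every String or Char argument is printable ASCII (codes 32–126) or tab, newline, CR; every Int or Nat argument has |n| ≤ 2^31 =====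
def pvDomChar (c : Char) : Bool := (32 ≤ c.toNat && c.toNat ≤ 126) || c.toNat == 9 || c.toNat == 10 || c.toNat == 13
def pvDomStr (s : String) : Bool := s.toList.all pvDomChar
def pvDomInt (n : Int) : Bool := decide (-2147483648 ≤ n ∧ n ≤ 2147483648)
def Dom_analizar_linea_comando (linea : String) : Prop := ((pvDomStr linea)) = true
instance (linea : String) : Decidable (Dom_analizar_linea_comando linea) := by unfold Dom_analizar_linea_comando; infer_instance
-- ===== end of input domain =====

-- B replaces A's per-character quote state machine + second cleanup pass by a positional
-- scanner that jumps over quoted segments with find()/slicing and finalizes each token as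
-- it is emitted (objective: alternative decomposition, same O(n) cost).

-- ===== PORT A =====
-- the operator list ['>>','<<','<','>','|','&'] (as char lists)
def pvOps : List (List Char) := [['>', '>'], ['<', '<'], ['<'], ['>'], ['|'], ['&']]

-- first loop of A: character scan with quote state; returns (elementos, current)
def pvALoop : List Char → List (List Char) → List Char → Option Char → (List (List Char) × List Char)
  | [], es, cur, _ => (es, cur)
  | c :: rest, es, cur, q =>
    if c = '"' ∨ c = '\'' then
      match q with
      | none => pvALoop rest es cur (some c)
      | some qc => if qc = c then pvALoop rest es cur none else pvALoop rest es (cur ++ [c]) q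
    else if (c = ' ' ∨ c = '\t') ∧ q = none then
      (if cur ≠ [] then pvALoop rest (es ++ [cur]) [] none else pvALoop rest es cur q)
    else pvALoop rest es (cur ++ [c]) q

-- second loop of A: walk elementos, append operator unchanged, else strip one matched pair of quotes
def pvAFinal : List (List Char) → List (List Char)
  | [] => []
  | e :: rest =>
    (if e ∈ pvOps then e
     else if (e.head? = some '"' ∧ e.getLast? = some '"') ∨ (e.head? = some '\'' ∧ e.getLast? = some '\'') then
       (e.drop 1).dropLast
     else e) :: pvAFinal rest

def analizar_linea_comando (linea : String) : List String :=
  let p := pvALoop linea.toList [] [] none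
  let elementos := if p.2 ≠ [] then p.1 ++ [p.2] else p.1
  (pvAFinal elementos).map String.mk

-- ===== PORT B =====
-- B's _unquote: strip a matched surrounding quote pair (tok is nonempty at the call site)
def pvUnquote (tok : List Char) : List Char :=
  match tok with
  | [] => []
  | c :: _ => if (c = '"' ∨ c = '\'') ∧ tok.getLast? = some c then (tok.drop 1).dropLast else tok

-- the append-site expression of Source B: `tok if tok in OPS else _unquote(tok)`
def pvFinalize (tok : List Char) : List Char :=
  if tok ∈ pvOps then tok else pvUnquote tok

-- the inner run scan's stop set: whitespace or a quote
def pvSpecial (ch : Char) : Bool := ch = ' ' ∨ ch = '\t' ∨ ch = '"' ∨ ch = '\''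

-- inner while of Source B: builds one token; `linea.find(c, i+1)` + slices are ported exactly as
-- takeWhile/dropWhile on the remaining characters (first occurrence of c), the run scan
-- `while j < n and linea[j] not in ...` likewise (its run starts with the ordinary char c,
-- so `c ::` is pulled out of the takeWhile); the token is kept as one char list (= the
-- join of Source B's slice parts); fuel = number of remaining characters (totality guard only)
def pvTokLoop : Nat → List Char → List Char → (List Char × List Char)
  | 0, cs, tok => (tok, cs)
  | _ + 1, [], tok => (tok, [])
  | fuel + 1, c :: rest, tok =>
    if c = ' ' ∨ c = '\t' then (tok, rest)
    else if c = '"' ∨ c = '\'' then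
      pvTokLoop fuel ((rest.dropWhile (· ≠ c)).tail) (tok ++ rest.takeWhile (· ≠ c))
    else
      pvTokLoop fuel (rest.dropWhile (fun ch => !(pvSpecial ch)))
        (tok ++ c :: rest.takeWhile (fun ch => !(pvSpecial ch)))

-- outer while of Source B: skip whitespace, build a token, emit it finalized (same fuel guard)
def pvMain : Nat → List Char → List (List Char)
  | 0, _ => []
  | _ + 1, [] => []
  | fuel + 1, c :: rest =>
    if c = ' ' ∨ c = '\t' then pvMain fuel rest
    else
      (if (pvTokLoop (c :: rest).length (c :: rest) []).1 ≠ [] then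
        [pvFinalize (pvTokLoop (c :: rest).length (c :: rest) []).1] else [])
        ++ pvMain fuel (pvTokLoop (c :: rest).length (c :: rest) []).2

def analizar_linea_comando_alt (linea : String) : List String :=
  (pvMain linea.toList.length linea.toList).map String.mk

-- ===== PRECONDITION & SPEC =====
def Spec_analizar_linea_comando (linea : String) (out : List String) : Prop := out = analizar_linea_comando_alt linea
instance (linea : String) (out : List String) : Decidable (Spec_analizar_linea_comando linea out) := by unfold Spec_analizar_linea_comando; infer_instance

-- ===== CLAIM (what is proved, stated in full; the proofs are below) =====
def Claim_equal_analizar_linea_comando : Prop := ∀ (linea : String), Dom_analizar_linea_comando linea → Spec_analizar_linea_comando linea (analizar_linea_comando linea)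


-- ===== LEMMAS AND PROOFS =====

-- A's second-pass transformation of one element equals B's finalize
theorem pvHead_eq (e : List Char) :
    (if e ∈ pvOps then e
     else if (e.head? = some '"' ∧ e.getLast? = some '"') ∨ (e.head? = some '\'' ∧ e.getLast? = some '\'') then
       (e.drop 1).dropLast
     else e) = pvFinalize e := by
  unfold pvFinalize pvUnquote
  by_cases hop : e ∈ pvOps
  · simp [hop]
  · simp only [hop, if_false]
    cases e with
    | nil => simp
    | cons c t =>
      by_cases h1 : c = '"'
      · subst h1; simp
      · by_cases h2 : c = '\''
        · subst h2; simp
        · simp [h1, h2]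

-- A's second pass is a map of finalize
theorem pvAFinal_eq_map : ∀ es : List (List Char), pvAFinal es = es.map pvFinalize := by
  intro es
  induction es with
  | nil => rfl
  | cons e rest ih => simp only [pvAFinal, List.map_cons, ih, pvHead_eq]

-- the inner loop only consumes characters
theorem pvTokLoop_rest_le : ∀ (fuel : Nat) (cs tok : List Char), cs.length ≤ fuel →
    (pvTokLoop fuel cs tok).2.length ≤ cs.length := by
  intro fuel
  induction fuel with
  | zero =>
    intro cs tok hlen
    have : cs = [] := List.length_eq_zero_iff.mp (Nat.le_zero.mp hlen)
    subst this; simp [pvTokLoop]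
  | succ n ih =>
    intro cs tok hlen
    cases cs with
    | nil => simp [pvTokLoop]
    | cons c rest =>
      simp only [List.length_cons, Nat.succ_le_succ_iff] at hlen
      by_cases hws : c = ' ' ∨ c = '\t'
      · simp only [pvTokLoop, if_pos hws, List.length_cons]; omega
      · by_cases hq : c = '"' ∨ c = '\''
        · have h1 : ((rest.dropWhile (· ≠ c)).tail).length = (rest.dropWhile (· ≠ c)).length - 1 :=
            List.length_tail
          have h2 := List.length_dropWhile_le (· ≠ c) rest
          have h3 := ih ((rest.dropWhile (· ≠ c)).tail) (tok ++ rest.takeWhile (· ≠ c)) (by omega)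
          simp only [pvTokLoop, if_neg hws, if_pos hq, List.length_cons]
          omega
        · have hd := List.length_dropWhile_le (fun ch => !(pvSpecial ch)) rest
          have h3 := ih (rest.dropWhile (fun ch => !(pvSpecial ch)))
            (tok ++ c :: rest.takeWhile (fun ch => !(pvSpecial ch))) (by omega)
          simp only [pvTokLoop, if_neg hws, if_neg hq, List.length_cons]
          omega

-- the fuel is a totality guard only: any sufficient fuel computes the same pair
theorem pvTokLoop_irrel : ∀ (f1 : Nat) (cs tok : List Char) (f2 : Nat),
    cs.length ≤ f1 → cs.length ≤ f2 → pvTokLoop f1 cs tok = pvTokLoop f2 cs tok := by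
  intro f1
  induction f1 with
  | zero =>
    intro cs tok f2 h1 _
    have : cs = [] := List.length_eq_zero_iff.mp (Nat.le_zero.mp h1)
    subst this; cases f2 <;> simp [pvTokLoop]
  | succ n ih =>
    intro cs tok f2 h1 h2
    cases cs with
    | nil => cases f2 <;> simp [pvTokLoop]
    | cons c rest =>
      cases f2 with
      | zero => simp at h2
      | succ m =>
        simp only [List.length_cons, Nat.succ_le_succ_iff] at h1 h2
        by_cases hws : c = ' ' ∨ c = '\t'
        · simp only [pvTokLoop, if_pos hws]
        · by_cases hq : c = '"' ∨ c = '\''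
          · have hl1 : ((rest.dropWhile (· ≠ c)).tail).length = (rest.dropWhile (· ≠ c)).length - 1 :=
              List.length_tail
            have hl2 := List.length_dropWhile_le (· ≠ c) rest
            simp only [pvTokLoop, if_neg hws, if_pos hq]
            exact ih _ _ m (by omega) (by omega)
          · have hd := List.length_dropWhile_le (fun ch => !(pvSpecial ch)) rest
            simp only [pvTokLoop, if_neg hws, if_neg hq]
            exact ih _ _ m (by omega) (by omega)

-- one non-whitespace head strictly shrinks the remainder
theorem pvTokLoop_rest_lt (c : Char) (rest tok : List Char) (h : ¬(c = ' ' ∨ c = '\t')) :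
    (pvTokLoop (c :: rest).length (c :: rest) tok).2.length ≤ rest.length := by
  by_cases hq : c = '"' ∨ c = '\''
  · have h1 : ((rest.dropWhile (· ≠ c)).tail).length = (rest.dropWhile (· ≠ c)).length - 1 :=
      List.length_tail
    have h2 := List.length_dropWhile_le (· ≠ c) rest
    have h3 := pvTokLoop_rest_le rest.length ((rest.dropWhile (· ≠ c)).tail)
      (tok ++ rest.takeWhile (· ≠ c)) (by omega)
    simp only [List.length_cons, pvTokLoop, if_neg h, if_pos hq]
    omega
  · have hd := List.length_dropWhile_le (fun ch => !(pvSpecial ch)) rest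
    have h3 := pvTokLoop_rest_le rest.length (rest.dropWhile (fun ch => !(pvSpecial ch)))
      (tok ++ c :: rest.takeWhile (fun ch => !(pvSpecial ch))) (by omega)
    simp only [List.length_cons, pvTokLoop, if_neg h, if_neg hq]
    omega

theorem pvMain_irrel : ∀ (f1 : Nat) (cs : List Char) (f2 : Nat),
    cs.length ≤ f1 → cs.length ≤ f2 → pvMain f1 cs = pvMain f2 cs := by
  intro f1
  induction f1 with
  | zero =>
    intro cs f2 h1 _
    have : cs = [] := List.length_eq_zero_iff.mp (Nat.le_zero.mp h1)
    subst this; cases f2 <;> simp [pvMain]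
  | succ n ih =>
    intro cs f2 h1 h2
    cases cs with
    | nil => cases f2 <;> simp [pvMain]
    | cons c rest =>
      cases f2 with
      | zero => simp at h2
      | succ m =>
        simp only [List.length_cons, Nat.succ_le_succ_iff] at h1 h2
        by_cases hws : c = ' ' ∨ c = '\t'
        · simp only [pvMain, if_pos hws]
          exact ih rest m h1 h2
        · have hr := pvTokLoop_rest_lt c rest [] hws
          simp only [pvMain, if_neg hws]
          rw [ih _ m (by omega) (by omega)]

-- inside quotes, A appends verbatim up to the matching quote (or to the end)
theorem pvALoop_quote : ∀ (cs : List Char) (es : List (List Char)) (cur : List Char) (q : Char),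
    q = '"' ∨ q = '\'' →
    pvALoop cs es cur (some q) =
      pvALoop ((cs.dropWhile (· ≠ q)).tail) es (cur ++ cs.takeWhile (· ≠ q)) none := by
  intro cs
  induction cs with
  | nil => intro es cur q _; simp [pvALoop]
  | cons c rest ih =>
    intro es cur q hq
    by_cases hc : c = q
    · subst hc
      have hcq : c = '"' ∨ c = '\'' := hq
      simp [pvALoop, hcq]
    · have hstep : pvALoop (c :: rest) es cur (some q) = pvALoop rest es (cur ++ [c]) (some q) := by
        by_cases hcq : c = '"' ∨ c = '\''
        · have : ¬ q = c := fun h => hc h.symm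
          simp [pvALoop, hcq, this]
        · simp [pvALoop, hcq]
      rw [hstep, ih es (cur ++ [c]) q hq]
      simp [hc]

-- outside quotes, A absorbs a maximal run of ordinary characters one by one
theorem pvALoop_run : ∀ (cs : List Char) (es : List (List Char)) (cur : List Char),
    pvALoop cs es cur none =
      pvALoop (cs.dropWhile (fun ch => !(pvSpecial ch))) es
        (cur ++ cs.takeWhile (fun ch => !(pvSpecial ch))) none := by
  intro cs
  induction cs with
  | nil => intro es cur; simp
  | cons c rest ih =>
    intro es cur
    by_cases hsp : pvSpecial c = true
    · simp [hsp]
    · have hq : ¬(c = '"' ∨ c = '\'') := by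
        intro h; apply hsp; rcases h with h | h <;> subst h <;> rfl
      have hws : ¬(c = ' ' ∨ c = '\t') := by
        intro h; apply hsp; rcases h with h | h <;> subst h <;> rfl
      have hstep : pvALoop (c :: rest) es cur none = pvALoop rest es (cur ++ [c]) none := by
        simp [pvALoop, hq, hws]
      rw [hstep, ih es (cur ++ [c])]
      simp [hsp]

-- proof-side bookkeeping: A's end-of-string flush, and B's "one token then continue" step
def pvClose (p : List (List Char) × List Char) : List (List Char) :=
  if p.2 ≠ [] then p.1 ++ [p.2] else p.1

def pvStep (cs cur : List Char) : List (List Char) :=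
  (if (pvTokLoop cs.length cs cur).1 ≠ [] then [pvFinalize (pvTokLoop cs.length cs cur).1] else [])
    ++ pvMain (pvTokLoop cs.length cs cur).2.length (pvTokLoop cs.length cs cur).2

theorem pvMain_eq_step : ∀ cs : List Char, pvMain cs.length cs = pvStep cs [] := by
  intro cs
  cases cs with
  | nil => simp [pvMain, pvStep, pvTokLoop]
  | cons c rest =>
    by_cases hws : c = ' ' ∨ c = '\t'
    · simp [pvMain, pvStep, pvTokLoop, hws]
    · have hr := pvTokLoop_rest_lt c rest [] hws
      simp only [List.length_cons] at hr
      simp only [List.length_cons, pvMain, if_neg hws, pvStep]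
      rw [pvMain_irrel rest.length _ _ (by omega) le_rfl]

-- main invariant: A's scan (outside quotes) with pending token cur produces, after the
-- final flush and per-element cleanup, exactly the already-emitted tokens plus B's
-- continuation from the same point
theorem pvMainLemma : ∀ (n : Nat) (cs : List Char), cs.length ≤ n → ∀ (es : List (List Char)) (cur : List Char),
    (pvClose (pvALoop cs es cur none)).map pvFinalize = es.map pvFinalize ++ pvStep cs cur := by
  intro n
  induction n with
  | zero =>
    intro cs hlen es cur
    have : cs = [] := List.length_eq_zero_iff.mp (Nat.le_zero.mp hlen)
    subst this
    by_cases hcur : cur ≠ [] <;> simp [pvALoop, pvClose, pvStep, pvTokLoop, pvMain, hcur]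
  | succ n ih =>
    intro cs hlen es cur
    cases cs with
    | nil =>
      by_cases hcur : cur ≠ [] <;> simp [pvALoop, pvClose, pvStep, pvTokLoop, pvMain, hcur]
    | cons c rest =>
      simp only [List.length_cons, Nat.succ_le_succ_iff] at hlen
      by_cases hq : c = '"' ∨ c = '\''
      · have hA : pvALoop (c :: rest) es cur none =
            pvALoop ((rest.dropWhile (· ≠ c)).tail) es (cur ++ rest.takeWhile (· ≠ c)) none := by
          simp only [pvALoop, if_pos hq]
          exact pvALoop_quote rest es cur c hq
        have hws : ¬(c = ' ' ∨ c = '\t') := by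
          rcases hq with h | h <;> subst h <;> decide
        have hl1 : ((rest.dropWhile (· ≠ c)).tail).length = (rest.dropWhile (· ≠ c)).length - 1 :=
          List.length_tail
        have hl2 := List.length_dropWhile_le (· ≠ c) rest
        have hB : pvStep (c :: rest) cur =
            pvStep ((rest.dropWhile (· ≠ c)).tail) (cur ++ rest.takeWhile (· ≠ c)) := by
          simp only [pvStep, List.length_cons, pvTokLoop, if_neg hws, if_pos hq]
          rw [pvTokLoop_irrel rest.length _ _ ((rest.dropWhile (· ≠ c)).tail).length
            (by omega) le_rfl]
        rw [hA, hB]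
        exact ih _ (by omega) es _
      · by_cases hws : c = ' ' ∨ c = '\t'
        · have hB : pvStep (c :: rest) cur =
              (if cur ≠ [] then [pvFinalize cur] else []) ++ pvMain rest.length rest := by
            simp only [pvStep, List.length_cons, pvTokLoop, if_pos hws]
          by_cases hcur : cur ≠ []
          · have hA : pvALoop (c :: rest) es cur none = pvALoop rest (es ++ [cur]) [] none := by
              simp [pvALoop, hq, hws, hcur]
            rw [hA, ih rest hlen (es ++ [cur]) [], hB, pvMain_eq_step rest]
            simp [hcur]
          · have hA : pvALoop (c :: rest) es cur none = pvALoop rest es cur none := by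
              simp [pvALoop, hq, hws, hcur]
            have hcur' : cur = [] := not_not.mp hcur
            subst hcur'
            rw [hA, ih rest hlen es [], hB, pvMain_eq_step rest]
            simp
        · have hsp : pvSpecial c = false := by
            unfold pvSpecial
            rcases (not_or.mp hws) with ⟨hw1, hw2⟩
            rcases (not_or.mp hq) with ⟨hq1, hq2⟩
            simp [hw1, hw2, hq1, hq2]
          have hA : pvALoop (c :: rest) es cur none =
              pvALoop (rest.dropWhile (fun ch => !(pvSpecial ch))) es
                (cur ++ c :: rest.takeWhile (fun ch => !(pvSpecial ch))) none := by
            rw [pvALoop_run (c :: rest) es cur]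
            simp [hsp]
          have hd := List.length_dropWhile_le (fun ch => !(pvSpecial ch)) rest
          have hB : pvStep (c :: rest) cur =
              pvStep (rest.dropWhile (fun ch => !(pvSpecial ch)))
                (cur ++ c :: rest.takeWhile (fun ch => !(pvSpecial ch))) := by
            simp only [pvStep, List.length_cons, pvTokLoop, if_neg hws, if_neg hq]
            rw [pvTokLoop_irrel rest.length _ _ (rest.dropWhile (fun ch => !(pvSpecial ch))).length
              (by omega) le_rfl]
          rw [hA, hB]
          exact ih _ (by omega) es _

-- ===== VERDICT (by name: the statement is the Claim_ definition above) =====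
theorem analizar_linea_comando_spec : Claim_equal_analizar_linea_comando := by
  intro linea _
  unfold Spec_analizar_linea_comando
  simp only [analizar_linea_comando, analizar_linea_comando_alt]
  have h := pvMainLemma linea.toList.length linea.toList le_rfl [] []
  simp only [List.map_nil, List.nil_append] at h
  have hclose : (if (pvALoop linea.toList [] [] none).2 ≠ [] then
        (pvALoop linea.toList [] [] none).1 ++ [(pvALoop linea.toList [] [] none).2]
      else (pvALoop linea.toList [] [] none).1) = pvClose (pvALoop linea.toList [] [] none) := rfl
  rw [hclose, pvAFinal_eq_map, h, pvMain_eq_step linea.toList]
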